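-- pv_equiv track=rewrite | github.com/andycasey/original-oracle | oracle/atmospheres.py | zaz_get_dolog
-- ===== SOURCE A (Python) =====
-- def zaz_get_dolog(attribute):
--     """ Returns whether an attribute should be interpolated logarithmically
--     or linearly. """
--
--     attribute = attribute.lower()
--     # Check for some non-logarithmic attributes first so they don't get mixed
--     # up in our acceptable_variations
--     if attribute in ["pp", "u", "ph"]: return False
--
--     depth_attributes = ["depth"]
--     density_attributes = ["rho", "nel"]
--     pressure_attributes = ["ptot", "pth", "pgas", "prad", "pel", "pturb"]
--     opacity_attributes = ["kapr", "kap5", "kapp", "alphar", "alpha5", "alphap"]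
--     granule_attributes  = ["area", "diam", "perim"]
--
--     logarithmic_attributes = density_attributes + pressure_attributes \
--         + opacity_attributes + granule_attributes + depth_attributes
--
--     if attribute in logarithmic_attributes: return True
--
--     acceptable_variations = ["ln{0}", "med_{0}", "{0}u", "{0}d"]
--     for variation in acceptable_variations:
--         if attribute in [variation.format(attr) for attr in logarithmic_attributes]: return True
--
--     # By this stage, we have no reason to think logarithmic, right?
--     return False
-- ===== SOURCE B (Python) =====
-- _LOG_ATTRS = frozenset([
--     "rho", "nel",
--     "ptot", "pth", "pgas", "prad", "pel", "pturb",
--     "kapr", "kap5", "kapp", "alphar", "alpha5", "alphap",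
--     "area", "diam", "perim",
--     "depth",
-- ])
--
--
-- def zaz_get_dolog(attribute):
--     """ Returns whether an attribute should be interpolated logarithmically
--     or linearly. """
--     attribute = attribute.lower()
--     if attribute in ("pp", "u", "ph"):
--         return False
--     if attribute in _LOG_ATTRS:
--         return True
--     # Parse one decoration off the input instead of enumerating every
--     # decorated variant of every base attribute.
--     if attribute.startswith("ln"):
--         return attribute[2:] in _LOG_ATTRS
--     if attribute.startswith("med_"):
--         return attribute[4:] in _LOG_ATTRS
--     if attribute.endswith("u") or attribute.endswith("d"):
--         return attribute[:-1] in _LOG_ATTRS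
--     return False
-- ===== Notes on version B (the rewrite author's own statement) =====
-- stated objective: simpler
-- what changed: B parses at most one decoration off the input (ln-/med_- prefix or u/d suffix) and does one set lookup, instead of A's generation of all 72 decorated variants of the 18 base attributes and membership scans over them.
import Mathlib
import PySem

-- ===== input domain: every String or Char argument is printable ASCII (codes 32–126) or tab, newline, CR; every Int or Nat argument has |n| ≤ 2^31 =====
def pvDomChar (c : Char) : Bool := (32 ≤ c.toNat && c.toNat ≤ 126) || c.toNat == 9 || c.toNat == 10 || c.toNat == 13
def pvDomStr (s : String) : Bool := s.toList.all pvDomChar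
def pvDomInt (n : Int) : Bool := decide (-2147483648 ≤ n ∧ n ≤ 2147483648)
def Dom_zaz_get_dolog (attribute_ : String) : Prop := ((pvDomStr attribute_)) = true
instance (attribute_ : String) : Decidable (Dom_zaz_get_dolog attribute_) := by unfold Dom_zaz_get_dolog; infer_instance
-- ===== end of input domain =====

-- B parses one decoration (ln-/med_- prefix or u/d suffix) off the input and does one set lookup, instead of enumerating all decorated variants; same results everywhere (objective: simpler).

-- ===== PORT A =====
-- A's logarithmic_attributes list (density + pressure + opacity + granule + depth), on List Char
def pvLogA : List (List Char) :=
  (["rho".toList, "nel".toList]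
    ++ ["ptot".toList, "pth".toList, "pgas".toList, "prad".toList, "pel".toList, "pturb".toList])
    ++ ["kapr".toList, "kap5".toList, "kapp".toList, "alphar".toList, "alpha5".toList, "alphap".toList]
    ++ ["area".toList, "diam".toList, "perim".toList]
    ++ ["depth".toList]

-- A's acceptable_variations; 'variation.format(attr)' is ported as the corresponding concatenation (exact for these literal patterns)
def pvVariationsA : List (List Char → List Char) :=
  [fun a => "ln".toList ++ a, fun a => "med_".toList ++ a,
   fun a => a ++ "u".toList, fun a => a ++ "d".toList]

-- the body of A after 'attribute = attribute.lower()' (the for-loop with early return is List.any)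
def pvCoreA (attr : List Char) : Bool :=
  if attr ∈ ["pp".toList, "u".toList, "ph".toList] then false
  else if attr ∈ pvLogA then true
  else if pvVariationsA.any (fun variation => attr ∈ pvLogA.map variation) then true
  else false

def zaz_get_dolog (attribute_ : String) : Bool :=
  pvCoreA (PySem.Chars.lower attribute_.toList)

-- ===== PORT B =====
-- B's _LOG_ATTRS frozenset (18 distinct strings), on List Char
def pvLogSetB : List (List Char) :=
  ["rho".toList, "nel".toList,
   "ptot".toList, "pth".toList, "pgas".toList, "prad".toList, "pel".toList, "pturb".toList,
   "kapr".toList, "kap5".toList, "kapp".toList, "alphar".toList, "alpha5".toList, "alphap".toList,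
   "area".toList, "diam".toList, "perim".toList,
   "depth".toList]

-- the body of B after 'attribute = attribute.lower()'
def pvCoreB (attr : List Char) : Bool :=
  if attr ∈ ["pp".toList, "u".toList, "ph".toList] then false
  else if attr ∈ pvLogSetB then true
  else if PySem.Chars.startswith attr "ln".toList then
    decide (PySem.Chars.slice attr (some 2) none ∈ pvLogSetB)
  else if PySem.Chars.startswith attr "med_".toList then
    decide (PySem.Chars.slice attr (some 4) none ∈ pvLogSetB)
  else if PySem.Chars.endswith attr "u".toList || PySem.Chars.endswith attr "d".toList then
    decide (PySem.Chars.slice attr none (some (-1)) ∈ pvLogSetB)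
  else false

def zaz_get_dolog_alt (attribute_ : String) : Bool :=
  pvCoreB (PySem.Chars.lower attribute_.toList)

-- ===== PRECONDITION & SPEC =====
def Spec_zaz_get_dolog (attribute_ : String) (out : Bool) : Prop := out = zaz_get_dolog_alt attribute_
instance (attribute_ : String) (out : Bool) : Decidable (Spec_zaz_get_dolog attribute_ out) := by unfold Spec_zaz_get_dolog; infer_instance

-- ===== CLAIM (what is proved, stated in full; the proofs are below) =====
def Claim_equal_zaz_get_dolog : Prop := ∀ (attribute_ : String), Dom_zaz_get_dolog attribute_ → Spec_zaz_get_dolog attribute_ (zaz_get_dolog attribute_)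

-- ===== LEMMAS AND PROOFS =====

-- the 72 decorated variants A enumerates
def pvC : List (List Char) :=
  pvLogA.map (fun a => "ln".toList ++ a) ++ pvLogA.map (fun a => "med_".toList ++ a)
    ++ pvLogA.map (fun a => a ++ "u".toList) ++ pvLogA.map (fun a => a ++ "d".toList)

theorem pvLogSetB_eq : pvLogSetB = pvLogA := by decide

theorem pv_anyC (t : List Char) :
    (pvVariationsA.any (fun variation => t ∈ pvLogA.map variation)) = decide (t ∈ pvC) := by
  simp [pvVariationsA, pvC, List.mem_append, Bool.decide_or]

theorem pv_allC : (pvC.all fun t => pvCoreA t && pvCoreB t) = true := by decide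

theorem pv_core_eq (t : List Char) : pvCoreA t = pvCoreB t := by
  by_cases hC : t ∈ pvC
  · have h := List.all_eq_true.mp pv_allC t hC
    cases hA : pvCoreA t <;> cases hB : pvCoreB t <;> simp_all
  · unfold pvCoreA pvCoreB
    rw [pvLogSetB_eq]
    by_cases h0 : t ∈ ["pp".toList, "u".toList, "ph".toList]
    · rw [if_pos h0, if_pos h0]
    · rw [if_neg h0, if_neg h0]
      by_cases hL : t ∈ pvLogA
      · rw [if_pos hL, if_pos hL]
      · rw [if_neg hL, if_neg hL, pv_anyC, decide_eq_false hC, if_neg (by simp)]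
        split_ifs with h1 h2 h3
        · refine (decide_eq_false ?_).symm
          intro hm
          obtain ⟨r, rfl⟩ := (PySem.Chars.startswith_iff t _).mp h1
          refine hC (List.mem_append_left _ (List.mem_append_left _
            (List.mem_append_left _ (List.mem_map.mpr ⟨r, ?_, rfl⟩))))
          rw [PySem.Chars.slice_eq_listSlice, PySem.List.slice_from _ (by norm_num)] at hm
          simpa using hm
        · refine (decide_eq_false ?_).symm
          intro hm
          obtain ⟨r, rfl⟩ := (PySem.Chars.startswith_iff t _).mp h2
          refine hC (List.mem_append_left _ (List.mem_append_left _
            (List.mem_append_right _ (List.mem_map.mpr ⟨r, ?_, rfl⟩))))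
          rw [PySem.Chars.slice_eq_listSlice, PySem.List.slice_from _ (by norm_num)] at hm
          simpa using hm
        · refine (decide_eq_false ?_).symm
          intro hm
          have hm' : t.dropLast ∈ pvLogA := by
            simpa [PySem.Chars.slice_eq_listSlice, PySem.List.slice_to_neg_one] using hm
          rw [Bool.or_eq_true] at h3
          rcases h3 with hu | hd
          · obtain ⟨r, hr⟩ := (PySem.Chars.endswith_iff t _).mp hu
            refine hC (List.mem_append_left _ (List.mem_append_right _
              (List.mem_map.mpr ⟨t.dropLast, hm', ?_⟩)))
            rw [← hr]; simp
          · obtain ⟨r, hr⟩ := (PySem.Chars.endswith_iff t _).mp hd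
            refine hC (List.mem_append_right _ (List.mem_map.mpr ⟨t.dropLast, hm', ?_⟩))
            rw [← hr]; simp
        · rfl

-- ===== VERDICT (by name: the statement is the Claim_ definition above) =====
theorem zaz_get_dolog_spec : Claim_equal_zaz_get_dolog := by
  intro attribute_ _
  unfold Spec_zaz_get_dolog zaz_get_dolog zaz_get_dolog_alt
  exact pv_core_eq _
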